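-- pv_equiv track=rewrite | github.com/Marvin-Deng/CS-161 | HW_2/hw2.py | MULT_DFS
-- ===== SOURCE A (Python) =====
-- def FINAL_STATE(S):
--     return S == (True, True, True, True)
--
-- def NEXT_STATE(S, A):
--     homer, baby, dog, poison = S
--
--     # Check for invalid current state: Baby unsupervised with dog or poison
--     if homer != baby and (baby == dog or baby == poison):
--         return []
--
--     new_state = None
--
--     if A == "h":
--         new_state = [(not homer, baby, dog, poison)]
--     elif A == "b":
--         if homer == baby:
--             new_state = [(not homer, not baby, dog, poison)]
--         else:
--             return []
--     elif A == "d":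
--         if homer == dog:
--             new_state = [(not homer, baby, not dog, poison)]
--         else:
--             return []
--     elif A == "p":
--         if homer == poison:
--             new_state = [(not homer, baby, dog, not poison)]
--         else:
--             return []
--
--     if new_state is None:
--         return []
--
--     new_h, new_b, new_d, new_p = new_state[0]
--
--     # Check for invalid new state: Baby unsupervised with dog or poison
--     if new_h != new_b and (new_b == new_d or new_b == new_p):
--         return []
--
--     return new_state
--
-- def SUCC_FN(S):
--     succ_states = []
--     moves = ["h", "b", "d", "p"]
--     for move in moves:
--         next_state = NEXT_STATE(S, move)
--         if next_state != []:
--             succ_states.append(next_state[0])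
--     return succ_states
--
-- def ON_PATH(S, STATES):
--     return S in STATES
--
-- def MULT_DFS(STATES, PATH):
--     for state in STATES:
--         stack = [(state, PATH + [state])]
--
--         while stack:
--             current_state, current_path = stack.pop()
--
--             if FINAL_STATE(current_state):
--                 return current_path
--
--             for successor in SUCC_FN(current_state):
--                 if not ON_PATH(successor, current_path):
--                     stack.append((successor, current_path + [successor]))
--
--     return []
-- ===== SOURCE B (Python) =====
-- # B: same search, but as a recursive DFS (call stack instead of an explicit stack);
-- # successors are tried in reversed order to visit states exactly as the LIFO stack does.
--
-- def FINAL_STATE(S):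
--     return S == (True, True, True, True)
--
-- def NEXT_STATE(S, A):
--     homer, baby, dog, poison = S
--     if homer != baby and (baby == dog or baby == poison):
--         return []
--     new_state = None
--     if A == "h":
--         new_state = [(not homer, baby, dog, poison)]
--     elif A == "b":
--         if homer == baby:
--             new_state = [(not homer, not baby, dog, poison)]
--         else:
--             return []
--     elif A == "d":
--         if homer == dog:
--             new_state = [(not homer, baby, not dog, poison)]
--         else:
--             return []
--     elif A == "p":
--         if homer == poison:
--             new_state = [(not homer, baby, dog, not poison)]
--         else:
--             return []
--     if new_state is None:
--         return []
--     new_h, new_b, new_d, new_p = new_state[0]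
--     if new_h != new_b and (new_b == new_d or new_b == new_p):
--         return []
--     return new_state
--
-- def SUCC_FN(S):
--     succ_states = []
--     for move in ["h", "b", "d", "p"]:
--         next_state = NEXT_STATE(S, move)
--         if next_state != []:
--             succ_states.append(next_state[0])
--     return succ_states
--
-- def ON_PATH(S, STATES):
--     return S in STATES
--
-- def dfs(state, path):
--     if FINAL_STATE(state):
--         return path
--     for successor in reversed(SUCC_FN(state)):
--         if not ON_PATH(successor, path):
--             result = dfs(successor, path + [successor])
--             if result:
--                 return result
--     return []
--
-- def MULT_DFS(STATES, PATH):
--     for state in STATES: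
--         result = dfs(state, PATH + [state])
--         if result:
--             return result
--     return []
-- ===== Notes on version B (the rewrite author's own statement) =====
-- stated objective: simpler
-- what changed: Replaced A's explicit stack of (state, path) pairs managed by a while loop with a recursive DFS helper that tries successors in reversed order and propagates the first non-empty path, so the pending-frontier bookkeeping disappears.
import Mathlib
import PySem

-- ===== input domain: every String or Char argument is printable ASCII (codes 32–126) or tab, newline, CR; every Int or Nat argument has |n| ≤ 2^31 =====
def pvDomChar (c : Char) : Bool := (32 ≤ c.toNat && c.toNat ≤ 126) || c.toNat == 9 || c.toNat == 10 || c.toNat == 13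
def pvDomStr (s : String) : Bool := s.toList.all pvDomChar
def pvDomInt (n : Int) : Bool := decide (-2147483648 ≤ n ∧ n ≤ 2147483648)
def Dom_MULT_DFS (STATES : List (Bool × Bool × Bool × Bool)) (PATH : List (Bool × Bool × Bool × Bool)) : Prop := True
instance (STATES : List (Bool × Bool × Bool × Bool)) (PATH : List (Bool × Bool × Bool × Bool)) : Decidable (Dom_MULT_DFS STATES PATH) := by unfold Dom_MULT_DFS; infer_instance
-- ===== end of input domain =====

-- B replaces A's explicit stack of (state, path) pairs by a recursive DFS over reversed
-- successor lists (same visit order, same returned path); objective: simpler.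

abbrev PvSt := Bool × Bool × Bool × Bool

-- ===== PORT A =====
def FINAL_STATE (S : PvSt) : Bool := S == (true, true, true, true)

def NEXT_STATE (S : PvSt) (A : String) : List PvSt :=
  let (homer, baby, dog, poison) := S
  if homer != baby && (baby == dog || baby == poison) then []
  else
    -- `new_state` as an Option; `none` covers both Python's early `return []`s and
    -- `new_state is None` (all of which make NEXT_STATE return [])
    let new_state : Option (List PvSt) :=
      if A = "h" then some [(!homer, baby, dog, poison)]
      else if A = "b" then (if homer == baby then some [(!homer, !baby, dog, poison)] else none)
      else if A = "d" then (if homer == dog then some [(!homer, baby, !dog, poison)] else none)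
      else if A = "p" then (if homer == poison then some [(!homer, baby, dog, !poison)] else none)
      else none
    match new_state with
    | none => []
    | some ns =>
      match ns with
      | [] => []  -- unreachable: new_state is always a singleton
      | (new_h, new_b, new_d, new_p) :: _ =>
        if new_h != new_b && (new_b == new_d || new_b == new_p) then [] else ns

def SUCC_FN (S : PvSt) : List PvSt :=
  ["h", "b", "d", "p"].foldl (fun succ_states move =>
    match NEXT_STATE S move with
    | [] => succ_states
    | x :: _ => succ_states ++ [x]) []

def ON_PATH (S : PvSt) (STATES : List PvSt) : Bool := S ∈ STATES

-- termination helpers for the ports (cited by the decreasing_by proofs below)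
theorem pv_sdiff_append_erase (p : List PvSt) (c : PvSt) :
    (Finset.univ \ (p ++ [c]).toFinset) = (Finset.univ \ p.toFinset).erase c := by
  simp [List.toFinset_append, Finset.sdiff_insert]

theorem pv_card_append_lt (p : List PvSt) (c : PvSt) (h : c ∉ p) :
    (Finset.univ \ (p ++ [c]).toFinset).card < (Finset.univ \ p.toFinset).card := by
  rw [pv_sdiff_append_erase]
  exact Finset.card_erase_lt_of_mem (by simp [h])

theorem pv_succ_len (s : PvSt) : (SUCC_FN s).length ≤ 4 := by
  revert s; decide

theorem pv_stack_measure_lt (s : PvSt) (p : List PvSt) (rest : List (PvSt × List PvSt)) :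
    (((((SUCC_FN s).filter (fun c => !ON_PATH c p)).map (fun c => (c, p ++ [c]))).reverse ++ rest).map
        (fun e => 5 ^ (Finset.univ \ e.2.toFinset).card)).sum
      < (((s, p) :: rest).map (fun e => 5 ^ (Finset.univ \ e.2.toFinset).card)).sum := by
  set m := (Finset.univ \ p.toFinset).card with hm
  rw [List.map_append, List.sum_append, List.map_cons, List.sum_cons]
  have key : ((((SUCC_FN s).filter (fun c => !ON_PATH c p)).map (fun c => (c, p ++ [c]))).reverse.map
      (fun e => 5 ^ (Finset.univ \ e.2.toFinset).card)).sum < 5 ^ m := by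
    set ch := (SUCC_FN s).filter (fun c => !ON_PATH c p) with hch
    rcases eq_or_ne ch [] with hc | hc
    · rw [hc]; simpa using Nat.pos_pow_of_ne_zero m (by norm_num : (5:ℕ) ≠ 0)
    · obtain ⟨c0, hc0⟩ := List.exists_mem_of_ne_nil ch hc
      have hfresh : ∀ c ∈ ch, c ∉ p := by
        intro c hcm
        have := List.of_mem_filter hcm
        simpa [ON_PATH] using this
      have hmpos : 1 ≤ m := by
        have : c0 ∈ Finset.univ \ p.toFinset := by simp [hfresh c0 hc0]
        have := Finset.card_pos.mpr ⟨c0, this⟩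
        omega
      have hterm : ∀ x ∈ ((ch.map (fun c => (c, p ++ [c]))).reverse).map
          (fun e => 5 ^ (Finset.univ \ e.2.toFinset).card), x ≤ 5 ^ (m - 1) := by
        intro x hx
        simp only [List.mem_map, List.mem_reverse] at hx
        obtain ⟨e, he, rfl⟩ := hx
        obtain ⟨c, hc', rfl⟩ := he
        have : (Finset.univ \ (p ++ [c]).toFinset).card = m - 1 := by
          rw [pv_sdiff_append_erase, hm]
          exact Finset.card_erase_of_mem (by simp [hfresh c hc'])
        show 5 ^ (Finset.univ \ (p ++ [c]).toFinset).card ≤ 5 ^ (m - 1)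
        rw [this]
      have hlen : ((ch.map (fun c => (c, p ++ [c]))).reverse).length ≤ 4 :=
        by simpa using le_trans (List.length_filter_le _ _) (pv_succ_len s)
      have hsum := List.sum_le_card_nsmul _ _ hterm
      have hpow : 5 ^ m = 5 * 5 ^ (m - 1) := by
        conv_lhs => rw [show m = 1 + (m - 1) by omega]
        rw [pow_add, pow_one]
      have hx : 1 ≤ 5 ^ (m - 1) := Nat.one_le_pow _ _ (by norm_num)
      simp only [List.length_map, smul_eq_mul] at hsum
      have : ((ch.map (fun c => (c, p ++ [c]))).reverse).length * 5 ^ (m - 1) ≤ 4 * 5 ^ (m - 1) :=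
        Nat.mul_le_mul_right _ hlen
      omega
  exact Nat.add_lt_add_right key _

-- the `while stack:` loop of A; `none` = stack exhausted (fall through to the next start state)
def pvLoopA : List (PvSt × List PvSt) → Option (List PvSt)
  | [] => none
  | (current_state, current_path) :: rest =>
    if FINAL_STATE current_state then some current_path
    else
      -- pushing each fresh successor in order onto the (head = top) stack
      pvLoopA ((((SUCC_FN current_state).filter (fun c => !ON_PATH c current_path)).map
                (fun c => (c, current_path ++ [c]))).reverse ++ rest)
termination_by stack => (stack.map (fun e => 5 ^ (Finset.univ \ e.2.toFinset).card)).sum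
decreasing_by exact pv_stack_measure_lt current_state current_path rest

def MULT_DFS (STATES : List (Bool × Bool × Bool × Bool)) (PATH : List (Bool × Bool × Bool × Bool)) : List (Bool × Bool × Bool × Bool) :=
  match STATES with
  | [] => []
  | state :: rest =>
    match pvLoopA [(state, PATH ++ [state])] with
    | some current_path => current_path
    | none => MULT_DFS rest PATH

-- ===== PORT B =====
mutual
  def pvDfs (state : PvSt) (path : List PvSt) : List PvSt :=
    if FINAL_STATE state then path
    else pvDfsGo ((SUCC_FN state).reverse) path
  termination_by ((Finset.univ \ path.toFinset).card, 1, 0)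
  decreasing_by
    exact Prod.Lex.right _ (Prod.Lex.left _ _ (by omega))

  -- the `for successor in reversed(SUCC_FN(state))` loop of B's dfs
  def pvDfsGo : List PvSt → List PvSt → List PvSt
    | [], _ => []
    | successor :: cs, path =>
      if ON_PATH successor path then pvDfsGo cs path
      else
        let result := pvDfs successor (path ++ [successor])
        if result ≠ [] then result else pvDfsGo cs path
  termination_by cs path => ((Finset.univ \ path.toFinset).card, 0, cs.length)
  decreasing_by
    · exact Prod.Lex.right _ (Prod.Lex.right _ (by simp))
    · rename_i h
      exact Prod.Lex.left _ _ (pv_card_append_lt path successor (by simpa [ON_PATH] using h))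
    · exact Prod.Lex.right _ (Prod.Lex.right _ (by simp))
end

def MULT_DFS_alt (STATES : List (Bool × Bool × Bool × Bool)) (PATH : List (Bool × Bool × Bool × Bool)) : List (Bool × Bool × Bool × Bool) :=
  match STATES with
  | [] => []
  | state :: rest =>
    let result := pvDfs state (PATH ++ [state])
    if result ≠ [] then result else MULT_DFS_alt rest PATH

-- ===== PRECONDITION & SPEC =====
def Spec_MULT_DFS (STATES : List (Bool × Bool × Bool × Bool)) (PATH : List (Bool × Bool × Bool × Bool)) (out : List (Bool × Bool × Bool × Bool)) : Prop := out = MULT_DFS_alt STATES PATH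
instance (STATES : List (Bool × Bool × Bool × Bool)) (PATH : List (Bool × Bool × Bool × Bool)) (out : List (Bool × Bool × Bool × Bool)) : Decidable (Spec_MULT_DFS STATES PATH out) := by unfold Spec_MULT_DFS; infer_instance

-- ===== CLAIM (what is proved, stated in full; the proofs are below) =====
def Claim_equal_MULT_DFS : Prop := ∀ (STATES : List (Bool × Bool × Bool × Bool)) (PATH : List (Bool × Bool × Bool × Bool)), Dom_MULT_DFS STATES PATH → Spec_MULT_DFS STATES PATH (MULT_DFS STATES PATH)

-- ===== LEMMAS AND PROOFS =====

-- G: B's search read off a pending stack (proof-only helper)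
def pvG : List (PvSt × List PvSt) → Option (List PvSt)
  | [] => none
  | e :: rest => if pvDfs e.1 e.2 = [] then pvG rest else some (pvDfs e.1 e.2)

theorem pvG_append (xs ys : List (PvSt × List PvSt)) :
    pvG (xs ++ ys) = match pvG xs with | none => pvG ys | some r => some r := by
  induction xs with
  | nil => simp [pvG]
  | cons e xs ih =>
    simp only [List.cons_append, pvG, ih]
    split <;> simp_all

theorem pvG_filter (cs : List PvSt) (p : List PvSt) :
    pvG ((cs.filter (fun c => !ON_PATH c p)).map (fun c => (c, p ++ [c])))
      = (if pvDfsGo cs p = [] then none else some (pvDfsGo cs p)) := by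
  induction cs with
  | nil => simp [pvG, pvDfsGo]
  | cons c cs ih =>
    rw [pvDfsGo]
    by_cases h : ON_PATH c p
    · simp [h, ih]
    · rw [List.filter_cons, if_pos (show (!ON_PATH c p) = true by simp [h]), List.map_cons, pvG]
      by_cases hr : pvDfs c (p ++ [c]) = []
      · simp [h, hr, ih]
      · simp [h, hr]

theorem pvLoopA_eq_pvG (stack : List (PvSt × List PvSt)) (hne : ∀ e ∈ stack, e.2 ≠ []) :
    pvLoopA stack = pvG stack := by
  induction stack using pvLoopA.induct with
  | case1 => simp [pvLoopA, pvG]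
  | case2 s p rest hfin =>
    have hp : p ≠ [] := hne (s, p) (by simp)
    rw [pvLoopA, if_pos hfin, pvG]
    have : pvDfs s p = p := by rw [pvDfs, if_pos hfin]
    simp [this, hp]
  | case3 s p rest hfin ih =>
    have hch : ∀ e ∈ (((SUCC_FN s).filter (fun c => !ON_PATH c p)).map
        (fun c => (c, p ++ [c]))).reverse ++ rest, e.2 ≠ [] := by
      intro e he
      rcases List.mem_append.mp he with h | h
      · rw [List.mem_reverse] at h
        obtain ⟨c, _, rfl⟩ := List.mem_map.mp h
        simp
      · exact hne e (List.mem_cons_of_mem _ h)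
    rw [pvLoopA, if_neg hfin, ih hch, pvG_append]
    have hrev : (((SUCC_FN s).filter (fun c => !ON_PATH c p)).map (fun c => (c, p ++ [c]))).reverse
        = (((SUCC_FN s).reverse.filter (fun c => !ON_PATH c p)).map (fun c => (c, p ++ [c]))) := by
      rw [← List.map_reverse, List.filter_reverse]
    rw [hrev, pvG_filter]
    have hdfs : pvDfs s p = pvDfsGo ((SUCC_FN s).reverse) p := by rw [pvDfs, if_neg hfin]
    rw [← hdfs, pvG]
    by_cases hr : pvDfs s p = []
    · simp [hr]
    · simp [hr]

theorem pvMULT_DFS_eq (STATES PATH : List PvSt) :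
    MULT_DFS STATES PATH = MULT_DFS_alt STATES PATH := by
  induction STATES with
  | nil => rfl
  | cons state rest ih =>
    have h := pvLoopA_eq_pvG [(state, PATH ++ [state])] (by simp)
    rw [MULT_DFS, MULT_DFS_alt, h]
    by_cases hr : pvDfs state (PATH ++ [state]) = [] <;> simp [pvG, hr, ih]

-- ===== VERDICT (by name: the statement is the Claim_ definition above) =====
theorem MULT_DFS_spec : Claim_equal_MULT_DFS := by
  intro STATES PATH _
  unfold Spec_MULT_DFS
  exact pvMULT_DFS_eq STATES PATH
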